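-- pv_equiv track=rewrite | github.com/krolikladoshka/solveit | yandex/lektionvier.py | beatingrooks
-- ===== SOURCE A (Python) =====
-- from itertools import chain
--
-- def beatingrooks(coords):
--     rows = {}
--     cols = {}
--
--     for row, col in coords:
--         rows[row] = rows.setdefault(row, 0) + 1
--         cols[col] = cols.setdefault(col, 0) + 1
--     sm = 0
--     for k, v in chain(rows.items(), cols.items()):
--         sm += v - 1
--
--     return sm
-- ===== SOURCE B (Python) =====
-- def beatingrooks(coords):
--     def adjacent_dups(vals):
--         vals = sorted(vals)
--         return sum(1 for a, b in zip(vals, vals[1:]) if a == b)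
--
--     coords = list(coords)
--     return adjacent_dups([r for r, _ in coords]) + adjacent_dups([c for _, c in coords])
-- ===== Notes on version B (the rewrite author's own statement) =====
-- stated objective: alternative
-- what changed: Replaces the hash-counting dicts and the items summation by a sort-then-scan: sort each coordinate list and count adjacent equal pairs, which equals the sum of (count-1) over groups since sorting makes equal values adjacent.
import Mathlib
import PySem

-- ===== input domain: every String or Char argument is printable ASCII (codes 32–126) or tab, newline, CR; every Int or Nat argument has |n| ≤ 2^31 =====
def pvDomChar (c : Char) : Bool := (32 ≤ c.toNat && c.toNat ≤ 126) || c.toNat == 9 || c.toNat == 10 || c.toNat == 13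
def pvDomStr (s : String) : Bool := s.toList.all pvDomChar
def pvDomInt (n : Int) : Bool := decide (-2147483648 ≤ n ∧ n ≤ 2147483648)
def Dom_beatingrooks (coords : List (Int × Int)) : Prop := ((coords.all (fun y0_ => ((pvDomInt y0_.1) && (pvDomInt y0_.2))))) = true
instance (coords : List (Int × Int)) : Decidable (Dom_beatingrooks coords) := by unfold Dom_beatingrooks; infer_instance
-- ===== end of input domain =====

-- B replaces A's hash-counting dicts and items summation by a sort-then-scan: sort each
-- coordinate list and count adjacent equal pairs; objective: alternative algorithm.

-- ===== PORT A =====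
def beatingrooks (coords : List (Int × Int)) : Int :=
  let st := coords.foldl
    (fun (st : PySem.Dict Int Int × PySem.Dict Int Int) rc =>
      let rows1 := st.1.setdefault rc.1 0
      let rows2 := rows1.insert rc.1 (rows1.getD rc.1 0 + 1)
      let cols1 := st.2.setdefault rc.2 0
      let cols2 := cols1.insert rc.2 (cols1.getD rc.2 0 + 1)
      (rows2, cols2))
    (PySem.Dict.empty, PySem.Dict.empty)
  (st.1.items ++ st.2.items).foldl (fun sm kv => sm + (kv.2 - 1)) 0

-- ===== PORT B =====
-- helper 'adjacent_dups' of Source B: sort, then count adjacent equal pairs of zip(vals, vals[1:])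
def adjacentDups (vals : List Int) : Int :=
  let s := PySem.List.sorted vals (fun x => x) false
  ((s.zip (PySem.List.slice s (some 1) none)).map
    (fun p => if p.1 = p.2 then (1 : Int) else 0)).sum

def beatingrooks_alt (coords : List (Int × Int)) : Int :=
  adjacentDups (coords.map (·.1)) + adjacentDups (coords.map (·.2))

-- ===== PRECONDITION & SPEC =====
def Spec_beatingrooks (coords : List (Int × Int)) (out : Int) : Prop := out = beatingrooks_alt coords
instance (coords : List (Int × Int)) (out : Int) : Decidable (Spec_beatingrooks coords out) := by unfold Spec_beatingrooks; infer_instance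

-- ===== CLAIM (what is proved, stated in full; the proofs are below) =====
def Claim_equal_beatingrooks : Prop := ∀ (coords : List (Int × Int)), Dom_beatingrooks coords → Spec_beatingrooks coords (beatingrooks coords)

-- ===== LEMMAS AND PROOFS =====

-- A's setdefault-then-overwrite body is the standard counting insert.
theorem stepA_eq_counting (d : PySem.Dict Int Int) (k : Int) :
    (d.setdefault k 0).insert k ((d.setdefault k 0).getD k 0 + 1)
      = d.insert k (d.getD k 0 + 1) := by
  by_cases h : d.contains k = true
  · rw [PySem.Dict.setdefault_of_contains _ _ h]
  · have h' : d.contains k = false := by simpa using h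
    rw [PySem.Dict.setdefault_of_not_contains _ _ h',
        PySem.Dict.getD_insert_self, PySem.Dict.insert_insert_self,
        PySem.Dict.getD_of_not_contains _ _ h']

-- A's single pair-state loop splits into two independent counting loops.
theorem foldA_split (coords : List (Int × Int))
    (d1 d2 : PySem.Dict Int Int) :
    coords.foldl
      (fun (st : PySem.Dict Int Int × PySem.Dict Int Int) rc =>
        let rows1 := st.1.setdefault rc.1 0
        let rows2 := rows1.insert rc.1 (rows1.getD rc.1 0 + 1)
        let cols1 := st.2.setdefault rc.2 0
        let cols2 := cols1.insert rc.2 (cols1.getD rc.2 0 + 1)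
        (rows2, cols2)) (d1, d2)
    = ((coords.map (·.1)).foldl (fun d x => d.insert x (d.getD x 0 + 1)) d1,
       (coords.map (·.2)).foldl (fun d x => d.insert x (d.getD x 0 + 1)) d2) := by
  have hf : (fun (st : PySem.Dict Int Int × PySem.Dict Int Int) (rc : Int × Int) =>
      let rows1 := st.1.setdefault rc.1 0
      let rows2 := rows1.insert rc.1 (rows1.getD rc.1 0 + 1)
      let cols1 := st.2.setdefault rc.2 0
      let cols2 := cols1.insert rc.2 (cols1.getD rc.2 0 + 1)
      (rows2, cols2))
    = (fun (st : PySem.Dict Int Int × PySem.Dict Int Int) (rc : Int × Int) =>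
      (st.1.insert rc.1 (st.1.getD rc.1 0 + 1), st.2.insert rc.2 (st.2.getD rc.2 0 + 1))) := by
    funext st rc
    simp only []
    rw [stepA_eq_counting, stepA_eq_counting]
  rw [hf]
  induction coords generalizing d1 d2 with
  | nil => rfl
  | cons rc rest ih =>
    simp only [List.foldl_cons, List.map_cons]
    exact ih _ _

-- ofList xs is a permutation of xs.dedup, so count-sums agree.
theorem sum_count_ofList (xs : List Int) :
    ((PySem.Set.ofList xs).map fun k => (xs.count k : Int)).sum
      = (xs.length : Int) := by
  have hperm : (PySem.Set.ofList xs).Perm xs.dedup := by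
    rw [List.perm_ext_iff_of_nodup (PySem.Set.nodup_ofList xs) xs.nodup_dedup]
    intro a
    rw [PySem.Set.mem_ofList, List.mem_dedup]
  have := (hperm.map (fun k => (xs.count k : Int))).sum_eq
  rw [this, ← List.sum_map_count_dedup_eq_length xs]
  push_cast
  rw [List.map_map]
  rfl

-- Summing (count-1) over a counter's items = total - number of distinct keys.
theorem sum_items_counter (xs : List Int) :
    (PySem.Dict.counter xs).items.foldl (fun sm kv => sm + (kv.2 - 1)) 0
      = (xs.length : Int) - PySem.Set.len (PySem.Set.ofList xs) := by
  rw [PySem.Dict.items_counter, PySem.List.foldl_add, List.map_map]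
  have : ((PySem.Set.ofList xs).map
      ((fun kv : Int × Int => kv.2 - 1) ∘ fun k => (k, (xs.count k : Int)))).sum
      = ((PySem.Set.ofList xs).map fun k => (xs.count k : Int)).sum
        - ((PySem.Set.ofList xs).length : Int) := by
    induction PySem.Set.ofList xs with
    | nil => simp
    | cons a l ih => simp [ih]; ring
  rw [this, sum_count_ofList]
  simp [PySem.Set.len]

-- On a ≤-sorted list, adjacent duplicate pairs count length - number of distinct elements.
theorem adj_pairwise (l : List Int) (h : l.Pairwise (· ≤ ·)) :
    ((l.zip l.tail).map (fun p => if p.1 = p.2 then (1 : Int) else 0)).sum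
      = (l.length : Int) - l.toFinset.card := by
  induction l with
  | nil => simp
  | cons a t ih =>
    cases t with
    | nil => simp
    | cons b t' =>
      have hab : a ≤ b := (List.pairwise_cons.mp h).1 b (by simp)
      have htail : (b :: t').Pairwise (· ≤ ·) := (List.pairwise_cons.mp h).2
      have ihbt := ih htail
      by_cases hmem : a ∈ b :: t'
      · -- a ≤ everything there, everything ≥ b ≥ ... ; then a = b
        have hba : b ≤ a := by
          rcases List.mem_cons.mp hmem with rfl | hat
          · exact le_refl a
          · exact le_trans ((List.pairwise_cons.mp htail).1 a hat) (le_refl a)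
        have hab' : a = b := le_antisymm hab hba
        subst hab'
        simp only [List.zip, List.tail_cons] at ihbt
        simp only [List.zip, List.tail_cons, List.zipWith_cons_cons, List.map_cons,
          List.sum_cons, ihbt]
        have : (a :: a :: t').toFinset = (a :: t').toFinset := by simp
        rw [this]
        simp only [List.length_cons]
        push_cast
        ring
      · have hne : a ≠ b := fun e => hmem (e ▸ List.mem_cons_self)
        simp only [List.zip, List.tail_cons] at ihbt
        simp only [List.zip, List.tail_cons, List.zipWith_cons_cons, List.map_cons,
          List.sum_cons, if_neg hne, ihbt]
        have : (a :: b :: t').toFinset.card = (b :: t').toFinset.card + 1 := by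
          rw [List.toFinset_cons, Finset.card_insert_of_notMem (by simpa using hmem)]
        rw [this]
        simp only [List.length_cons]
        push_cast
        ring

-- adjacentDups counts length - distinct elements (in PySem.Set terms).
theorem adjacentDups_eq (xs : List Int) :
    adjacentDups xs = (xs.length : Int) - PySem.Set.len (PySem.Set.ofList xs) := by
  simp only [adjacentDups, PySem.List.slice_from_one]
  have hp : (PySem.List.sorted xs (fun x => x) false).Pairwise (· ≤ ·) :=
    PySem.List.sorted_pairwise xs (fun x => x)
  rw [adj_pairwise _ hp]
  have hperm : (PySem.List.sorted xs (fun x => x) false).Perm xs :=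
    PySem.List.sorted_perm xs (fun x => x) false
  rw [hperm.length_eq, List.toFinset_eq_of_perm _ _ hperm]
  congr 1
  have hperm2 : (PySem.Set.ofList xs).Perm xs.dedup := by
    rw [List.perm_ext_iff_of_nodup (PySem.Set.nodup_ofList xs) xs.nodup_dedup]
    intro a
    rw [PySem.Set.mem_ofList, List.mem_dedup]
  rw [show PySem.Set.len (PySem.Set.ofList xs) = ((PySem.Set.ofList xs).length : Int) from rfl,
      hperm2.length_eq, ← List.card_toFinset]

-- ===== VERDICT (by name: the statement is the Claim_ definition above) =====
theorem beatingrooks_spec : Claim_equal_beatingrooks := by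
  intro coords _
  unfold Spec_beatingrooks beatingrooks beatingrooks_alt
  simp only [foldA_split, PySem.Dict.foldl_insert_getD_add_one_eq_counter]
  rw [List.foldl_append, sum_items_counter]
  have h2 : ∀ (init : Int) (xs : List Int),
      (PySem.Dict.counter xs).items.foldl (fun sm kv => sm + (kv.2 - 1)) init
        = init + (PySem.Dict.counter xs).items.foldl (fun sm kv => sm + (kv.2 - 1)) 0 := by
    intro init xs
    rw [PySem.List.foldl_add, PySem.List.foldl_add]
    ring
  rw [h2, sum_items_counter, adjacentDups_eq, adjacentDups_eq]
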